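-- pv_equiv track=rewrite | github.com/dillonwu-97/competitive_programming | codeforces/misc/thestring.py | solve
-- ===== SOURCE A (Python) =====
-- import string
--
-- alph = list(string.ascii_lowercase)
--
-- def solve(arr):
-- 	strlen = arr[0]
-- 	sublen = arr[1]
-- 	count = arr[2]
-- 	ret = ''
--
-- 	ctrack = 0
-- 	for i in range(strlen):
-- 		ret += alph[ctrack]
-- 		ctrack+=1
-- 		if (ctrack == count):
-- 			ctrack = 0
-- 		if ctrack == sublen:
-- 			ctrack = 0
-- 	return ret
-- ===== SOURCE B (Python) =====
-- import string
--
-- alph = list(string.ascii_lowercase)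
--
-- def solve(arr):
--     strlen = arr[0]
--     sublen = arr[1]
--     count = arr[2]
--     if strlen <= 0:
--         return ''
--     periods = [v for v in (count, sublen) if v >= 1]
--     p = min(periods) if periods else strlen
--     pat = ''.join(alph[j] for j in range(min(p, strlen)))
--     return (pat * (strlen // p + 1))[:strlen]
-- ===== Notes on version B (the rewrite author's own statement) =====
-- stated objective: simpler
-- what changed: Replaces A's stateful char-by-char loop with two reset checks per step by computing the effective period p = min of the positive values among (count, sublen) (default strlen), building one period of letters, and tiling-and-truncating it to length strlen.
-- outside the precondition, e.g. on solve([26]): A raises IndexError, B raises IndexError; on solve([30, 0, 0]): A raises IndexError, B raises IndexError; on solve([30, 0, 27]): A raises IndexError, B raises IndexError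
import Mathlib
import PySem

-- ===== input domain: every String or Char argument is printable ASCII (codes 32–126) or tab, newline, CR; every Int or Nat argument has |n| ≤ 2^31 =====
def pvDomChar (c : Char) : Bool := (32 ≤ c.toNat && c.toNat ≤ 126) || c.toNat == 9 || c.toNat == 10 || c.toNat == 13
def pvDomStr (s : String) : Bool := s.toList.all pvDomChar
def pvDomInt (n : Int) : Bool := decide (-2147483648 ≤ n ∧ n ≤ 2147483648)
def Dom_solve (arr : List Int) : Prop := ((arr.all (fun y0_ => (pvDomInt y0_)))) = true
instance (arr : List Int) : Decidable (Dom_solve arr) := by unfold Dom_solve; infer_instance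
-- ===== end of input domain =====

-- B replaces A's char-by-char reset loop by computing one period of letters and tiling it (simpler decomposition).

-- ===== PORT A =====
def pvAlph : List Char :=
  ['a','b','c','d','e','f','g','h','i','j','k','l','m',
   'n','o','p','q','r','s','t','u','v','w','x','y','z']

-- loop body of A: append alph[ctrack], increment, the two reset checks; none = IndexError
def solveBody (sublen count : Int) (st : Option (List Char × Int)) (_i : Int) :
    Option (List Char × Int) :=
  match st with
  | none => none
  | some (ret, ctrack) =>
    match PySem.List.pyGet? pvAlph ctrack with
    | none => none
    | some ch =>
      let ret := ret ++ [ch]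
      let ctrack := ctrack + 1
      let ctrack := if ctrack = count then 0 else ctrack
      let ctrack := if ctrack = sublen then 0 else ctrack
      some (ret, ctrack)

def solve (arr : List Int) : String :=
  match PySem.List.pyGet? arr 0, PySem.List.pyGet? arr 1, PySem.List.pyGet? arr 2 with
  | some strlen, some sublen, some count =>
    match (PySem.List.pyRange 0 strlen 1).foldl (solveBody sublen count)
        (some (([] : List Char), (0 : Int))) with
    | some (ret, _) => String.ofList ret
    | none => ""    -- IndexError in Python; unreachable under Pre_solve
  | _, _, _ => ""   -- IndexError in Python; unreachable under Pre_solve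

-- ===== PORT B =====
-- one period's worth of letters, by explicit indexing (none = IndexError, as in Source B)
def altAlph : List Char :=
  ['a','b','c','d','e','f','g','h','i','j','k','l','m',
   'n','o','p','q','r','s','t','u','v','w','x','y','z']

def altPat (q : Int) : Option (List Char) :=
  (PySem.List.pyRange 0 q 1).foldl
    (fun acc j =>
      match acc, PySem.List.pyGet? altAlph j with
      | some l, some ch => some (l ++ [ch])
      | some _, none => none
      | none, none => none
      | none, some _ => none)
    (some [])

def solve_alt (arr : List Int) : String :=
  match PySem.List.pyGet? arr 0 with
  | some strlen =>
    match PySem.List.pyGet? arr 1 with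
    | some sublen =>
      match PySem.List.pyGet? arr 2 with
      | some count =>
        if strlen ≤ 0 then ""
        else
          let periods := [count, sublen].filter (fun v => 1 ≤ v)
          let p := (PySem.List.min? periods (fun v => v)).getD strlen
          match altPat (min p strlen) with
          | some pat =>
            String.ofList (PySem.List.slice
              ((List.replicate (PySem.Int.floordiv strlen p + 1).toNat pat).flatten)
              none (some strlen))
          | none => ""  -- IndexError in Python; unreachable under Pre_solve
      | none => ""    -- IndexError in Python; unreachable under Pre_solve
    | none => ""
  | none => ""

-- ===== PRECONDITION & SPEC =====
-- Pre_ excludes exactly the inputs where Python A raises IndexError: fewer than 3 elements,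
-- or the effective letter period min(period, strlen) exceeds 26 so alph[26] is reached.
def Pre_solve (arr : List Int) : Prop :=
  3 ≤ arr.length ∧
  (PySem.List.pyGetD arr 0 0 ≤ 26 ∨
   (1 ≤ PySem.List.pyGetD arr 2 0 ∧ PySem.List.pyGetD arr 2 0 ≤ 26) ∨
   (1 ≤ PySem.List.pyGetD arr 1 0 ∧ PySem.List.pyGetD arr 1 0 ≤ 26))
instance (arr : List Int) : Decidable (Pre_solve arr) := by unfold Pre_solve; infer_instance
def pvWitness_solve : List Int := [10, 3, 5]

def Spec_solve (arr : List Int) (out : String) : Prop := out = solve_alt arr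
instance (arr : List Int) (out : String) : Decidable (Spec_solve arr out) := by unfold Spec_solve; infer_instance

-- ===== CLAIM (what is proved, stated in full; the proofs are below) =====
def Claim_equal_solve : Prop := ∀ (arr : List Int), Dom_solve arr → Pre_solve arr → Spec_solve arr (solve arr)

-- ===== LEMMAS AND PROOFS =====

-- indexing the fixed 26-letter alphabet succeeds below index 26
lemma alph_get (k : Nat) (hk : k ≤ 25) :
    PySem.List.pyGet? pvAlph (k : Int) = some (pvAlph.getD k 'a') := by
  rw [PySem.List.pyGet?_natCast]
  have hlen : pvAlph.length = 26 := rfl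
  rw [List.getElem?_eq_getElem (by omega), List.getD_eq_getElem _ _ (by omega)]

-- A's ctrack update realises counting modulo the effective period p
lemma stepR (sublen count : Int) (p : Nat) (_h1 : 1 ≤ p)
    (hpc : (p : Int) = count ∨ (p : Int) = sublen)
    (hc : 1 ≤ count → (p : Int) ≤ count)
    (hu : 1 ≤ sublen → (p : Int) ≤ sublen)
    (k : Nat) (hk : k < p) :
    (if (if ((k : Int) + 1) = count then 0 else ((k : Int) + 1)) = sublen then 0
      else (if ((k : Int) + 1) = count then 0 else ((k : Int) + 1)))
      = (((k + 1) % p : Nat) : Int) := by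
  by_cases h : k + 1 = p
  · have hm : (k + 1) % p = 0 := by rw [h, Nat.mod_self]
    rw [hm]
    rcases hpc with hcq | huq
    · have hkc : ((k : Int) + 1) = count := by omega
      rw [if_pos hkc]
      split <;> simp
    · by_cases h2 : ((k : Int) + 1) = count
      · rw [if_pos h2]; split <;> simp
      · have hks : ((k : Int) + 1) = sublen := by omega
        rw [if_neg h2, if_pos hks]; simp
  · have hm : (k + 1) % p = k + 1 := Nat.mod_eq_of_lt (by omega)
    rw [hm]
    have hc' : ((k : Int) + 1) ≠ count := by
      by_cases hcp : 1 ≤ count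
      · have := hc hcp; omega
      · omega
    have hu' : ((k : Int) + 1) ≠ sublen := by
      by_cases hup : 1 ≤ sublen
      · have := hu hup; omega
      · omega
    rw [if_neg hc', if_neg hu']
    push_cast; ring

-- one step of A's loop, periodic case
lemma bodyR_step (sublen count : Int) (p : Nat) (h1 : 1 ≤ p)
    (hpc : (p : Int) = count ∨ (p : Int) = sublen)
    (hc : 1 ≤ count → (p : Int) ≤ count)
    (hu : 1 ≤ sublen → (p : Int) ≤ sublen)
    (j : Nat) (hj : j % p ≤ 25) (acc : List Char) (x : Int) :
    solveBody sublen count (some (acc, ((j % p : Nat) : Int))) x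
      = some (acc ++ [pvAlph.getD (j % p) 'a'], (((j + 1) % p : Nat) : Int)) := by
  have hjp : j % p < p := Nat.mod_lt j (by omega)
  have hstep := stepR sublen count p h1 hpc hc hu (j % p) hjp
  rw [Nat.mod_add_mod] at hstep
  simp only [solveBody, alph_get (j % p) hj, hstep]

-- A's whole loop, periodic case: characters are alph[(j+i) % p]
lemma loopA_R (sublen count : Int) (p : Nat) (h1 : 1 ≤ p)
    (hpc : (p : Int) = count ∨ (p : Int) = sublen)
    (hc : 1 ≤ count → (p : Int) ≤ count)
    (hu : 1 ≤ sublen → (p : Int) ≤ sublen) :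
    ∀ (l : List Int) (j : Nat) (acc : List Char),
      (∀ i, i < l.length → (j + i) % p ≤ 25) →
      l.foldl (solveBody sublen count) (some (acc, ((j % p : Nat) : Int)))
        = some (acc ++ (List.range l.length).map (fun i => pvAlph.getD ((j + i) % p) 'a'),
                (((j + l.length) % p : Nat) : Int)) := by
  intro l
  induction l with
  | nil => intro j acc _; simp
  | cons x t ih =>
    intro j acc hb
    have hj : j % p ≤ 25 := by simpa using hb 0 (by simp)
    rw [List.foldl_cons, bodyR_step sublen count p h1 hpc hc hu j hj acc x]
    rw [ih (j + 1) (acc ++ [pvAlph.getD (j % p) 'a'])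
        (fun i hi => by
          have := hb (i + 1) (by simpa using hi)
          rwa [show j + 1 + i = j + (i + 1) from by omega])]
    simp only [Prod.mk.injEq, Option.some.injEq, List.length_cons]
    constructor
    · rw [List.append_assoc, List.range_succ_eq_map, List.map_cons, List.map_map]
      rw [List.singleton_append]
      simp only [Nat.add_zero, List.append_right_inj, List.cons.injEq, true_and]
      apply List.map_congr_left
      intro i _
      simp only [Function.comp_apply]
      rw [show j + 1 + i = j + (i + 1) from by omega]
    · rw [show j + 1 + t.length = j + (t.length + 1) from by omega]

-- A's whole loop, no positive reset: ctrack just counts up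
lemma loopA_N (sublen count : Int) (hc : count ≤ 0) (hu : sublen ≤ 0) :
    ∀ (l : List Int) (j : Nat) (acc : List Char),
      (∀ i, i < l.length → j + i ≤ 25) →
      l.foldl (solveBody sublen count) (some (acc, (j : Int)))
        = some (acc ++ (List.range l.length).map (fun i => pvAlph.getD (j + i) 'a'),
                ((j + l.length : Nat) : Int)) := by
  intro l
  induction l with
  | nil => intro j acc _; simp
  | cons x t ih =>
    intro j acc hb
    have hj : j ≤ 25 := by simpa using hb 0 (by simp)
    have hc' : ((j : Int) + 1) ≠ count := by omega
    have hu' : ((j : Int) + 1) ≠ sublen := by omega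
    rw [List.foldl_cons]
    rw [show solveBody sublen count (some (acc, (j : Int))) x
        = some (acc ++ [pvAlph.getD j 'a'], ((j + 1 : Nat) : Int)) by
      simp only [solveBody, alph_get j hj, if_neg hc', if_neg hu']
      push_cast; ring_nf]
    rw [ih (j + 1) (acc ++ [pvAlph.getD j 'a'])
        (fun i hi => by have := hb (i + 1) (by simpa using hi); omega)]
    simp only [Prod.mk.injEq, Option.some.injEq, List.length_cons]
    constructor
    · rw [List.append_assoc, List.range_succ_eq_map, List.map_cons, List.map_map]
      rw [List.singleton_append]
      simp only [Nat.add_zero, List.append_right_inj, List.cons.injEq, true_and]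
      apply List.map_congr_left
      intro i _
      simp only [Function.comp_apply]
      rw [show j + 1 + i = j + (i + 1) from by omega]
    · rw [show j + 1 + t.length = j + (t.length + 1) from by omega]

-- B's pattern builder over any list of small nonnegative indices
lemma patFold : ∀ (l : List Int) (acc : List Char),
    (∀ x ∈ l, 0 ≤ x ∧ x ≤ 25) →
    l.foldl
      (fun acc j =>
        match acc, PySem.List.pyGet? altAlph j with
        | some l', some ch => some (l' ++ [ch])
        | some _, none => none
        | none, none => none
        | none, some _ => none)
      (some acc)
      = some (acc ++ l.map (fun j => pvAlph.getD j.toNat 'a')) := by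
  intro l
  simp only [show altAlph = pvAlph from rfl]
  induction l with
  | nil => intro acc _; simp
  | cons x t ih =>
    intro acc h
    have hx := h x (by simp)
    have hg : PySem.List.pyGet? pvAlph x = some (pvAlph.getD x.toNat 'a') := by
      have := alph_get x.toNat (by omega)
      rwa [Int.toNat_of_nonneg hx.1] at this
    rw [List.foldl_cons, hg]
    show t.foldl _ (some (acc ++ [pvAlph.getD x.toNat 'a'])) = _
    rw [ih (acc ++ [pvAlph.getD x.toNat 'a']) (fun y hy => h y (by simp [hy]))]
    simp

-- B's pattern equals the first q letters
lemma altPat_eq (q : Nat) (hq : q ≤ 26) :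
    altPat (q : Int) = some ((List.range q).map (fun j => pvAlph.getD j 'a')) := by
  unfold altPat
  rw [patFold (PySem.List.pyRange 0 (q : Int) 1) []
      (fun x hx => by rw [PySem.List.mem_pyRange_one] at hx; omega)]
  rw [List.nil_append]
  congr 1
  apply List.ext_getElem
  · simp [PySem.List.length_pyRange_one]
  · intro i h1 h2
    simp [PySem.List.getElem_pyRange_one]

-- an element of the tiled pattern
lemma flat_rep_get (pat : List Char) (q : Nat) (hq : pat.length = q) (_h1 : 1 ≤ q) :
    ∀ (m i : Nat), i < m * q → (List.replicate m pat).flatten[i]? = some (pat.getD (i % q) 'a') := by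
  intro m
  induction m with
  | zero => intro i h; omega
  | succ m ih =>
    intro i h
    have hmul : (m + 1) * q = m * q + q := by ring
    rw [List.replicate_succ, List.flatten_cons]
    by_cases hi : i < q
    · rw [List.getElem?_append_left (by omega), Nat.mod_eq_of_lt hi,
          List.getElem?_eq_getElem (by omega), List.getD_eq_getElem _ _ (by omega)]
    · rw [List.getElem?_append_right (by omega), hq, ih (i - q) (by omega)]
      congr 2
      conv_rhs => rw [show i = (i - q) + q by omega]
      rw [Nat.add_mod_right]

-- tiling then truncating yields position-wise pat[i % q]
lemma tile_take (pat : List Char) (q m s : Nat) (hq : pat.length = q) (h1 : 1 ≤ q)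
    (hm : s ≤ m * q) :
    ((List.replicate m pat).flatten).take s
      = (List.range s).map (fun i => pat.getD (i % q) 'a') := by
  apply List.ext_getElem?
  intro i
  by_cases hi : i < s
  · rw [List.getElem?_take_of_lt hi, flat_rep_get pat q hq h1 m i (by omega)]
    rw [List.getElem?_map, List.getElem?_range hi]
    rfl
  · rw [List.getElem?_eq_none (by simp; omega), List.getElem?_eq_none (by simp; omega)]

-- enough copies of the pattern are tiled to cover the whole string
lemma tile_count (P s : Int) (hp : 1 ≤ P) (hs : 1 ≤ s) :
    s ≤ (s / P + 1) * min P s := by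
  rcases Int.lt_or_le s P with h | h
  · rw [min_eq_right (le_of_lt h), Int.ediv_eq_zero_of_lt (by omega) h]
    omega
  · rw [min_eq_left h]
    have h1 := Int.mul_ediv_add_emod s P
    have h2 : s % P < P := Int.emod_lt_of_pos s (by omega)
    have h3 : 0 ≤ s % P := Int.emod_nonneg s (by omega)
    have h4 : (s / P + 1) * P = s / P * P + P := by ring
    have h5 : P * (s / P) = s / P * P := by ring
    omega

-- indices below min(p, strlen) reduce the same way modulo p and modulo min(p, strlen)
lemma idx_eq (pNat s' i : Nat) (_hp : 1 ≤ pNat) (hi : i < s') :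
    i % pNat = i % min pNat s' := by
  rcases Nat.le_total pNat s' with h | h
  · rw [Nat.min_eq_left h]
  · rw [Nat.min_eq_right h, Nat.mod_eq_of_lt hi, Nat.mod_eq_of_lt (by omega)]

-- accessed alphabet positions stay below 26 under the precondition
lemma bound_helper (pNat s' : Nat) (hp : 1 ≤ pNat) (hq : min pNat s' ≤ 26) :
    ∀ i, i < s' → i % pNat ≤ 25 := by
  intro i hi
  rcases Nat.le_total pNat s' with h | h
  · have := Nat.mod_lt i (show 0 < pNat by omega)
    omega
  · rw [Nat.mod_eq_of_lt (by omega)]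
    omega

-- B's tail (pattern, tiling, truncation) as an explicit character list
lemma altSide (P s : Int) (hp : 1 ≤ P) (hs : 1 ≤ s) (h26 : min P.toNat s.toNat ≤ 26) :
    (match altPat (min P s) with
     | some pat =>
        String.ofList (PySem.List.slice
          ((List.replicate (PySem.Int.floordiv s P + 1).toNat pat).flatten)
          none (some s))
     | none => "")
    = String.ofList ((List.range s.toNat).map
        (fun i => pvAlph.getD (i % min P.toNat s.toNat) 'a')) := by
  have hminI : min P s = ((min P.toNat s.toNat : Nat) : Int) := by
    simp [Nat.cast_min]; omega
  rw [hminI, altPat_eq _ h26]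
  have hfd : PySem.Int.floordiv s P = s / P :=
    PySem.Int.floordiv_eq_ediv_of_pos (by omega)
  have hdiv0 : 0 ≤ s / P := Int.ediv_nonneg (by omega) (by omega)
  have hcnt := tile_count P s hp hs
  have hm : s.toNat ≤ (PySem.Int.floordiv s P + 1).toNat * min P.toNat s.toNat := by
    have hc : ((PySem.Int.floordiv s P + 1).toNat : Int) = s / P + 1 := by
      rw [hfd]; omega
    zify
    rw [hc]
    calc ((s.toNat : Nat) : Int) = s := by omega
      _ ≤ (s / P + 1) * min P s := hcnt
      _ = (s / P + 1) * min ((P.toNat : Nat) : Int) ((s.toNat : Nat) : Int) := by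
            congr 1
            omega
  rw [show (match some ((List.range (min P.toNat s.toNat)).map (fun j => pvAlph.getD j 'a')) with
       | some pat =>
          String.ofList (PySem.List.slice
            ((List.replicate (PySem.Int.floordiv s P + 1).toNat pat).flatten)
            none (some s))
       | none => "")
      = String.ofList (PySem.List.slice
          ((List.replicate (PySem.Int.floordiv s P + 1).toNat
            ((List.range (min P.toNat s.toNat)).map (fun j => pvAlph.getD j 'a'))).flatten)
          none (some s)) from rfl]
  rw [PySem.List.slice_to _ (show (0:Int) ≤ s by omega)]
  rw [tile_take _ (min P.toNat s.toNat) _ s.toNat (by simp) (by omega) hm]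
  congr 1
  apply List.map_congr_left
  intro i hi
  rw [List.mem_range] at hi
  rw [PySem.List.getD_map_range _ _ _ _ (Nat.mod_lt i (by omega))]

-- A's loop on the whole range, started as in solve, periodic case
lemma Aside_R (u c s : Int) (hs1 : 1 ≤ s) (P : Int) (hP : 1 ≤ P)
    (hpc : ((P.toNat : Nat) : Int) = c ∨ ((P.toNat : Nat) : Int) = u)
    (hcg : 1 ≤ c → ((P.toNat : Nat) : Int) ≤ c)
    (hug : 1 ≤ u → ((P.toNat : Nat) : Int) ≤ u)
    (h26 : min P.toNat s.toNat ≤ 26) :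
    (PySem.List.pyRange 0 s 1).foldl (solveBody u c) (some (([] : List Char), (0 : Int)))
      = some ((List.range s.toNat).map (fun i => pvAlph.getD (i % P.toNat) 'a'),
              ((s.toNat % P.toNat : Nat) : Int)) := by
  have hlenr : (PySem.List.pyRange 0 s 1).length = s.toNat := by
    rw [PySem.List.length_pyRange_one]; omega
  have hb : ∀ i, i < (PySem.List.pyRange 0 s 1).length → (0 + i) % P.toNat ≤ 25 := by
    intro i hi
    rw [hlenr] at hi
    simpa using bound_helper P.toNat s.toNat (by omega) h26 i hi
  have h := loopA_R u c P.toNat (by omega) hpc hcg hug (PySem.List.pyRange 0 s 1) 0 [] hb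
  simpa [hlenr] using h

-- A's loop on the whole range, no positive reset
lemma Aside_N (u c s : Int) (hs1 : 1 ≤ s) (hc : c ≤ 0) (hu : u ≤ 0) (hs26 : s ≤ 26) :
    (PySem.List.pyRange 0 s 1).foldl (solveBody u c) (some (([] : List Char), (0 : Int)))
      = some ((List.range s.toNat).map (fun i => pvAlph.getD i 'a'), ((s.toNat : Nat) : Int)) := by
  have hlenr : (PySem.List.pyRange 0 s 1).length = s.toNat := by
    rw [PySem.List.length_pyRange_one]; omega
  have hb : ∀ i, i < (PySem.List.pyRange 0 s 1).length → 0 + i ≤ 25 := by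
    intro i hi
    rw [hlenr] at hi
    omega
  have h := loopA_N u c hc hu (PySem.List.pyRange 0 s 1) 0 [] hb
  simpa [hlenr] using h

-- the two character formulas agree position by position
lemma chars_eq (pNat s' : Nat) (hp : 1 ≤ pNat) :
    ((List.range s').map (fun i => pvAlph.getD (i % pNat) 'a'))
      = (List.range s').map (fun i => pvAlph.getD (i % min pNat s') 'a') := by
  apply List.map_congr_left
  intro i hi
  rw [List.mem_range] at hi
  rw [idx_eq pNat s' i hp hi]

lemma chars_eq_N (s' : Nat) :
    ((List.range s').map (fun i => pvAlph.getD i 'a'))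
      = (List.range s').map (fun i => pvAlph.getD (i % min s' s') 'a') := by
  apply List.map_congr_left
  intro i hi
  rw [List.mem_range] at hi
  rw [Nat.min_self, Nat.mod_eq_of_lt hi]

-- ===== VERDICT (by name: the statement is the Claim_ definition above) =====
theorem solve_spec : Claim_equal_solve := by
  intro arr _ hpre
  unfold Spec_solve
  obtain ⟨hlen, hdisj⟩ := hpre
  match arr with
  | [] => simp at hlen
  | [_] => simp at hlen
  | [_, _] => simp at hlen
  | s :: u :: c :: r =>
    have g0 : PySem.List.pyGet? (s::u::c::r) (0:Int) = some s := by
      rw [show (0:Int) = ((0:Nat):Int) from rfl, PySem.List.pyGet?_natCast]; rfl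
    have g1 : PySem.List.pyGet? (s::u::c::r) (1:Int) = some u := by
      rw [show (1:Int) = ((1:Nat):Int) from rfl, PySem.List.pyGet?_natCast]; rfl
    have g2 : PySem.List.pyGet? (s::u::c::r) (2:Int) = some c := by
      rw [show (2:Int) = ((2:Nat):Int) from rfl, PySem.List.pyGet?_natCast]; rfl
    have d0 : PySem.List.pyGetD (s::u::c::r) (0:Int) 0 = s := by
      rw [show (0:Int) = ((0:Nat):Int) from rfl, PySem.List.pyGetD_natCast]; rfl
    have d1 : PySem.List.pyGetD (s::u::c::r) (1:Int) 0 = u := by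
      rw [show (1:Int) = ((1:Nat):Int) from rfl, PySem.List.pyGetD_natCast]; rfl
    have d2 : PySem.List.pyGetD (s::u::c::r) (2:Int) 0 = c := by
      rw [show (2:Int) = ((2:Nat):Int) from rfl, PySem.List.pyGetD_natCast]; rfl
    rw [d0] at hdisj; rw [d1] at hdisj; rw [d2] at hdisj
    simp only [solve, solve_alt, g0, g1, g2]
    by_cases hs : s ≤ 0
    · rw [PySem.List.pyRange_one_eq_nil hs, if_pos hs]
      rfl
    · rw [if_neg hs]
      have hs1 : 1 ≤ s := by omega
      have hsn : s = ((s.toNat : Nat) : Int) := by omega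
      have hlenr : (PySem.List.pyRange 0 s 1).length = s.toNat := by
        rw [PySem.List.length_pyRange_one]; omega
      by_cases hcp : 1 ≤ c <;> by_cases hup : 1 ≤ u
      -- both resets positive: the period is min c u
      · rw [Aside_R u c s hs1 (min c u) (by omega) (by omega) (by omega) (by omega) (by omega)]
        rw [show List.filter (fun v => decide (1 ≤ v)) [c, u] = [c, u] from by
          simp [List.filter, hcp, hup]]
        rw [PySem.List.min?_id_cons]
        simp only [List.foldl_cons, List.foldl_nil, Option.getD_some]
        rw [altSide (min c u) s (by omega) hs1 (by omega)]
        exact congrArg String.ofList (chars_eq (min c u).toNat s.toNat (by omega))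
      -- only count positive: the period is count
      · rw [Aside_R u c s hs1 c (by omega) (by omega) (by omega) (by omega) (by omega)]
        rw [show List.filter (fun v => decide (1 ≤ v)) [c, u] = [c] from by
          simp [List.filter, hcp, hup]]
        rw [PySem.List.min?_id_cons]
        simp only [List.foldl_nil, Option.getD_some]
        rw [altSide c s (by omega) hs1 (by omega)]
        exact congrArg String.ofList (chars_eq c.toNat s.toNat (by omega))
      -- only sublen positive: the period is sublen
      · rw [Aside_R u c s hs1 u (by omega) (by omega) (by omega) (by omega) (by omega)]
        rw [show List.filter (fun v => decide (1 ≤ v)) [c, u] = [u] from by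
          simp [List.filter, hcp, hup]]
        rw [PySem.List.min?_id_cons]
        simp only [List.foldl_nil, Option.getD_some]
        rw [altSide u s (by omega) hs1 (by omega)]
        exact congrArg String.ofList (chars_eq u.toNat s.toNat (by omega))
      -- no positive reset: the period defaults to strlen
      · rw [Aside_N u c s hs1 (by omega) (by omega) (by omega)]
        rw [show List.filter (fun v => decide (1 ≤ v)) [c, u] = [] from by
          simp [List.filter, hcp, hup]]
        rw [show PySem.List.min? ([] : List Int) (fun v => v) = none from by
          simp [PySem.List.min?_eq_none_iff]]
        simp only [Option.getD_none]
        rw [altSide s s hs1 hs1 (by omega)]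
        exact congrArg String.ofList (chars_eq_N s.toNat)
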